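-- pv_equiv track=rewrite | github.com/PanosAntoniadis/SnackDown-2019 | Online-Qualifier/CHEFPRMS.py | check
-- ===== SOURCE A (Python) =====
-- semiprimes = [6, 10, 14, 15, 21, 22, 26, 33, 34, 35, 38, 39, 46, 51, 55, 57, 58, 62, 65, 69, 74,
--               77, 82, 85, 86, 87, 91, 93, 94, 95, 106, 111, 115, 118, 119, 122, 123, 129, 133, 134,
--               141, 142, 143, 145, 146, 155, 158, 159, 161, 166, 177, 178, 183, 185, 187, 194]
--
-- def check(N):
--     for i in range(0,len(semiprimes)):
--         flag = False
--         for j in range(0,len(semiprimes)):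
--             # if N is equal to the sum of two semiprimes we return true
--             if (N == semiprimes[i] + semiprimes[j]):
--                 flag = True
--                 return flag
--             if (semiprimes[j] >= N):
--                 break
--         if (semiprimes[i] >= N):
--             return flag
--     return flag
-- ===== SOURCE B (Python) =====
-- semiprimes = [6, 10, 14, 15, 21, 22, 26, 33, 34, 35, 38, 39, 46, 51, 55, 57, 58, 62, 65, 69, 74,
--               77, 82, 85, 86, 87, 91, 93, 94, 95, 106, 111, 115, 118, 119, 122, 123, 129, 133, 134,
--               141, 142, 143, 145, 146, 155, 158, 159, 161, 166, 177, 178, 183, 185, 187, 194]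
--
-- _S = set(semiprimes)
--
-- def check(N):
--     for s in semiprimes:
--         if N - s in _S:
--             return True
--     return False
-- ===== Notes on version B (the rewrite author's own statement) =====
-- stated objective: simpler
-- what changed: Replaced the O(L^2) nested index scan with sorted-list pruning/break branches by a single pass over the semiprimes that tests the complement N-s against a precomputed set, eliminating the inner loop entirely.
import Mathlib
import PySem

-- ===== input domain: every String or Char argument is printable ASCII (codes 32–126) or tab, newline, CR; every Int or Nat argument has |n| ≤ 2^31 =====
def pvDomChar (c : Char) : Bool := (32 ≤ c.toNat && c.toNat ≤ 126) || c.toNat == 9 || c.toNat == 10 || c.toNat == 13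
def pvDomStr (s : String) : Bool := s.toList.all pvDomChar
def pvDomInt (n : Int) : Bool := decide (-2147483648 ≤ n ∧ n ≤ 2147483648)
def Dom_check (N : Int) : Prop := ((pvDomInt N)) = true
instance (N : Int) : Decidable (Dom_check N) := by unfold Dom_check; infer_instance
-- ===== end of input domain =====

-- B replaces A's nested sorted-scan with a single pass testing the complement N-s against a set (simpler).

-- ===== PORT A =====
def semiprimesL : List Int := [6, 10, 14, 15, 21, 22, 26, 33, 34, 35, 38, 39, 46, 51, 55, 57, 58, 62, 65, 69, 74,
  77, 82, 85, 86, 87, 91, 93, 94, 95, 106, 111, 115, 118, 119, 122, 123, 129, 133, 134,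
  141, 142, 143, 145, 146, 155, 158, 159, 161, 166, 177, 178, 183, 185, 187, 194]

-- inner j-loop of A: returns true on the equality hit ('return flag' with flag=True),
-- false when it breaks (sj >= N) or runs off the end
def checkInnerA (N si : Int) : List Int → Bool
  | [] => false
  | sj :: rest =>
    if N = si + sj then true
    else if sj ≥ N then false
    else checkInnerA N si rest

-- outer i-loop of A: flag is False whenever 'return flag' at 'semiprimes[i] >= N' or the final
-- 'return flag' is reached (a True flag always returned inside the inner loop)
def checkOuterA (N : Int) : List Int → Bool
  | [] => false
  | si :: rest =>
    if checkInnerA N si semiprimesL then true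
    else if si ≥ N then false
    else checkOuterA N rest

def check (N : Int) : Bool := checkOuterA N semiprimesL

-- ===== PORT B =====
def semiS : PySem.Set Int := PySem.Set.ofList semiprimesL

-- B's single loop: for s in semiprimes: if N - s in _S: return True; return False
def checkAltLoop (N : Int) : List Int → Bool
  | [] => false
  | s :: rest => if PySem.Set.contains semiS (N - s) then true else checkAltLoop N rest

def check_alt (N : Int) : Bool := checkAltLoop N semiprimesL

-- ===== PRECONDITION & SPEC =====
def Spec_check (N : Int) (out : Bool) : Prop := out = check_alt N
instance (N : Int) (out : Bool) : Decidable (Spec_check N out) := by unfold Spec_check; infer_instance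

-- ===== CLAIM (what is proved, stated in full; the proofs are below) =====
def Claim_equal_check : Prop := ∀ (N : Int), Dom_check N → Spec_check N (check N)

-- ===== LEMMAS AND PROOFS =====

lemma semis_pos : ∀ x ∈ semiprimesL, 0 < x := by decide

lemma semis_sorted : semiprimesL.Pairwise (· ≤ ·) := by decide

lemma innerA_eq_any (N si : Int) (hsi : 0 < si) :
    ∀ l : List Int, l.Pairwise (· ≤ ·) →
      checkInnerA N si l = l.any (fun sj => N == si + sj) := by
  intro l
  induction l with
  | nil => intro _; rfl
  | cons sj rest ih =>
    intro hp
    rcases List.pairwise_cons.mp hp with ⟨hle, hrest⟩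
    by_cases heq : N = si + sj
    · simp [checkInnerA, heq]
    · by_cases hbr : sj ≥ N
      · have hrest_false : rest.any (fun sj' => N == si + sj') = false := by
          rw [List.any_eq_false]
          intro x hx
          have := hle x hx
          simp only [beq_iff_eq]
          omega
        simp [checkInnerA, heq, hbr, hrest_false]
      · simp [checkInnerA, heq, hbr, ih hrest]

lemma innerA_semis_eq_any (N si : Int) (hsi : 0 < si) :
    checkInnerA N si semiprimesL = semiprimesL.any (fun sj => N == si + sj) :=
  innerA_eq_any N si hsi semiprimesL semis_sorted

lemma outerA_eq_any (N : Int) :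
    ∀ l : List Int, (∀ x ∈ l, 0 < x) → l.Pairwise (· ≤ ·) →
      checkOuterA N l = l.any (fun si => semiprimesL.any (fun sj => N == si + sj)) := by
  intro l
  induction l with
  | nil => intro _ _; rfl
  | cons si rest ih =>
    intro hpos hp
    rcases List.pairwise_cons.mp hp with ⟨hle, hrest⟩
    have hsi : 0 < si := hpos si (by simp)
    have hin := innerA_semis_eq_any N si hsi
    by_cases hf : checkInnerA N si semiprimesL = true
    · simp [checkOuterA, hf, hin ▸ hf]
    · have hf' : semiprimesL.any (fun sj => N == si + sj) = false := by
        rw [← hin]; exact Bool.eq_false_iff.mpr hf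
      by_cases hbr : si ≥ N
      · have hrest_false :
            rest.any (fun si' => semiprimesL.any (fun sj => N == si' + sj)) = false := by
          simp only [List.any_eq_false]
          intro si' hsi' hany
          obtain ⟨sj, hsj, hEq⟩ := List.any_eq_true.mp hany
          have h1 : si ≤ si' := hle si' hsi'
          have h2 : 0 < sj := semis_pos sj hsj
          have h3 : N = si' + sj := by exact_mod_cast beq_iff_eq.mp hEq
          omega
        simp [checkOuterA, hf, hbr, hf', hrest_false]
      · simp [checkOuterA, hf, hbr, hf',
          ih (fun x hx => hpos x (by simp [hx])) hrest]

lemma check_iff (N : Int) :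
    check N = true ↔ ∃ si ∈ semiprimesL, ∃ sj ∈ semiprimesL, N = si + sj := by
  unfold check
  rw [outerA_eq_any N semiprimesL semis_pos semis_sorted]
  simp

lemma altLoop_eq_any (N : Int) :
    ∀ l : List Int, checkAltLoop N l = l.any (fun s => PySem.Set.contains semiS (N - s)) := by
  intro l
  induction l with
  | nil => rfl
  | cons s rest ih =>
    simp [checkAltLoop, ih, PySem.Set.contains]

lemma check_alt_iff (N : Int) :
    check_alt N = true ↔ ∃ s ∈ semiprimesL, N - s ∈ semiprimesL := by
  unfold check_alt
  rw [altLoop_eq_any]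
  simp only [List.any_eq_true, PySem.Set.contains_iff, semiS, PySem.Set.mem_ofList]

-- ===== VERDICT (by name: the statement is the Claim_ definition above) =====
theorem check_spec : Claim_equal_check := by
  intro N _
  unfold Spec_check
  rw [Bool.eq_iff_iff, check_iff, check_alt_iff]
  constructor
  · rintro ⟨si, hsi, sj, hsj, rfl⟩
    exact ⟨si, hsi, by simpa using hsj⟩
  · rintro ⟨s, hs, hmem⟩
    exact ⟨s, hs, N - s, hmem, by omega⟩
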